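-- pv_equiv track=rewrite | github.com/huili0154/cstm_vn | strategies/ds_dmtr_strategy.py | _split_volume
-- ===== SOURCE A (Python) =====
-- def _split_volume(total: int, n: int) -> list[int]:
--     total = (int(total) // 100) * 100
--     if total < 100:
--         return []
--     n = max(1, int(n))
--     max_parts = max(1, total // 100)
--     n = min(n, max_parts)
--     lots = total // 100
--     base = lots // n
--     rem = lots % n
--     out: list[int] = []
--     for i in range(n):
--         q = (base + (1 if i < rem else 0)) * 100
--         if q >= 100:
--             out.append(q)
--     return out
-- ===== SOURCE B (Python) =====
-- def _split_volume(total: int, n: int) -> list[int]: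
--     total = (int(total) // 100) * 100
--     if total < 100:
--         return []
--     lots = total // 100
--     n = min(max(1, int(n)), lots)
--     out: list[int] = []
--     while n > 0:
--         q = -(-lots // n)      # ceil division: largest fair share among the remaining n
--         out.append(q * 100)
--         lots -= q
--         n -= 1
--     return out
-- ===== Notes on version B (the rewrite author's own statement) =====
-- stated objective: alternative
-- what changed: Replaces A's precomputed base/rem with an indexed loop branching on i<rem (plus a q>=100 filter) by a greedy one-pass peel: repeatedly take the ceiling share ceil(lots/n) of the remaining lots, shrinking lots and n each step, with no remainder bookkeeping and no filter.
import Mathlib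
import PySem

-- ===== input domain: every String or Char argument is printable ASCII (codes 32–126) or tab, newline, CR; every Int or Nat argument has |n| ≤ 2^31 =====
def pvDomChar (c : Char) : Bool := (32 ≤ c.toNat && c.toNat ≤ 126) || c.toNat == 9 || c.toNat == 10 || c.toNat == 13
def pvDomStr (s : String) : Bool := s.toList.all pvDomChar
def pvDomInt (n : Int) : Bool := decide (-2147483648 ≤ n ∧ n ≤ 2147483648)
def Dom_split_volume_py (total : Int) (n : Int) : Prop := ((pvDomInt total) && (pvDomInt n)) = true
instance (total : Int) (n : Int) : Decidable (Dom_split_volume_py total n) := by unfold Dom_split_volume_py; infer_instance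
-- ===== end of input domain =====

-- B replaces A's precomputed base/rem indexed loop (with its i<rem branch and q>=100 filter)
-- by a greedy one-pass peel taking the ceiling share of the remaining lots each step; alternative, same cost.


-- ===== PORT A =====
def split_volume_py (total : Int) (n : Int) : List Int :=
  let total' := (PySem.Int.floordiv total 100) * 100
  if total' < 100 then []
  else
    let n1 := max 1 n
    let max_parts := max 1 (PySem.Int.floordiv total' 100)
    let n2 := min n1 max_parts
    let lots := PySem.Int.floordiv total' 100
    let base := PySem.Int.floordiv lots n2
    let rem := PySem.Int.mod lots n2
    (PySem.List.pyRange 0 n2 1).foldl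
      (fun out i =>
        let q := (base + (if i < rem then 1 else 0)) * 100
        if q ≥ 100 then out ++ [q] else out) []

-- ===== PORT B =====
-- the while loop of Source B: n counts down to 0, each step peels q = ceil(lots/n) (= -(-lots // n))
def pvPeel (lots : Int) : Nat → List Int
  | 0 => []
  | k + 1 =>
    let q := -(PySem.Int.floordiv (-lots) ((k : Int) + 1))
    q * 100 :: pvPeel (lots - q) k

def split_volume_py_alt (total : Int) (n : Int) : List Int :=
  let total' := (PySem.Int.floordiv total 100) * 100
  if total' < 100 then []
  else
    let lots := PySem.Int.floordiv total' 100
    let n' := min (max 1 n) lots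
    pvPeel lots n'.toNat

-- ===== PRECONDITION & SPEC =====
def Spec_split_volume_py (total : Int) (n : Int) (out : List Int) : Prop := out = split_volume_py_alt total n
instance (total : Int) (n : Int) (out : List Int) : Decidable (Spec_split_volume_py total n out) := by unfold Spec_split_volume_py; infer_instance

-- ===== CLAIM =====
def Claim_equal_split_volume_py : Prop := ∀ (total : Int) (n : Int), Dom_split_volume_py total n → Spec_split_volume_py total n (split_volume_py total n)

-- ===== LEMMAS AND PROOFS =====

-- unique quotient/remainder for a given decomposition (positive divisor)
lemma myediv (a q r b : Int) (h : a = b * q + r) (h0 : 0 ≤ r) (h1 : r < b) : a / b = q := by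
  subst h; rw [add_comm, Int.add_mul_ediv_left r q (by omega : b ≠ 0), Int.ediv_eq_zero_of_lt h0 h1]; ring

lemma myemod (a q r b : Int) (h : a = b * q + r) (h0 : 0 ≤ r) (h1 : r < b) : a % b = r := by
  subst h; rw [add_comm, Int.add_mul_emod_self_left, Int.emod_eq_of_lt h0 h1]

-- map of a two-valued function over pyRange 0 n2 splits into two replicated blocks
lemma map_split_replicate (base rem n2 : Int) (h0 : 0 ≤ rem) (h1 : rem ≤ n2) :
    (PySem.List.pyRange 0 n2 1).map (fun i => (base + (if i < rem then (1:Int) else 0)) * 100)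
      = List.replicate rem.toNat ((base + 1) * 100) ++ List.replicate (n2 - rem).toNat (base * 100) := by
  rw [PySem.List.pyRange_one_append 0 rem n2 h0 h1, List.map_append]
  congr 1
  · rw [List.map_congr_left (g := fun _ => (base + 1) * 100)
      (by intro i hi
          rw [PySem.List.mem_pyRange_one] at hi
          simp [if_pos hi.2])]
    simp [PySem.List.length_pyRange_one]
  · rw [List.map_congr_left (g := fun _ => base * 100)
      (by intro i hi
          rw [PySem.List.mem_pyRange_one] at hi
          simp [if_neg (by omega : ¬ i < rem)])]
    simp [PySem.List.length_pyRange_one]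

-- the greedy ceiling peel produces exactly the two replicated blocks of the fair split
lemma pvPeel_closed (k : Nat) : ∀ lots : Int, 0 ≤ lots →
    pvPeel lots (k + 1)
      = List.replicate (lots % ((k : Int) + 1)).toNat ((lots / ((k : Int) + 1) + 1) * 100)
        ++ List.replicate ((((k : Int) + 1) - lots % ((k : Int) + 1)).toNat) ((lots / ((k : Int) + 1)) * 100) := by
  induction k with
  | zero =>
    intro lots _
    simp [pvPeel, PySem.Int.floordiv]
  | succ k ih =>
    intro lots hlots
    have hm : (0:Int) < (k : Int) + 1 + 1 := by positivity
    obtain ⟨b, r, hb0, hr0, hrlt, hdm, hq1, hq2⟩ :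
        ∃ b r : Int, 0 ≤ b ∧ 0 ≤ r ∧ r < (k : Int) + 1 + 1 ∧ lots = ((k : Int) + 1 + 1) * b + r
          ∧ lots / ((k : Int) + 1 + 1) = b ∧ lots % ((k : Int) + 1 + 1) = r :=
      ⟨lots / ((k : Int) + 1 + 1), lots % ((k : Int) + 1 + 1),
       Int.ediv_nonneg hlots hm.le, Int.emod_nonneg _ (by omega),
       Int.emod_lt_of_pos _ hm, (Int.mul_ediv_add_emod lots _).symm, rfl, rfl⟩
    have hstep : pvPeel lots (k + 1 + 1)
        = (-(PySem.Int.floordiv (-lots) (((k + 1 : Nat) : Int) + 1))) * 100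
          :: pvPeel (lots - (-(PySem.Int.floordiv (-lots) (((k + 1 : Nat) : Int) + 1)))) (k + 1) := rfl
    rw [hstep,
        show (((k + 1 : Nat) : Int) + 1) = (k : Int) + 1 + 1 from by push_cast; ring,
        PySem.Int.floordiv_eq_ediv_of_pos hm]
    rw [hq1, hq2]
    by_cases hr : r = 0
    · rw [show (-lots) / ((k : Int) + 1 + 1) = -b from
        myediv _ _ 0 _ (by rw [hr] at hdm; linear_combination -hdm) le_rfl hm, neg_neg]
      have hlots' : lots - b = ((k : Int) + 1) * b + 0 := by linear_combination hdm + hr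
      rw [ih (lots - b)
          (by have := mul_nonneg (by positivity : (0:Int) ≤ (k : Int) + 1) hb0; omega)]
      rw [myediv _ b 0 _ hlots' le_rfl (by positivity),
          myemod _ b 0 _ hlots' le_rfl (by positivity), hr]
      have hn : ((k : Int) + 1 + 1 - 0).toNat = ((k : Int) + 1 - 0).toNat + 1 := by omega
      rw [hn, List.replicate_succ]
      simp
    · rw [show (-lots) / ((k : Int) + 1 + 1) = -(b + 1) from
        myediv _ _ (((k : Int) + 1 + 1) - r) _ (by linear_combination -hdm) (by omega) (by omega),
        neg_neg]
      have hlots' : lots - (b + 1) = ((k : Int) + 1) * b + (r - 1) := by linear_combination hdm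
      rw [ih (lots - (b + 1))
          (by have := mul_nonneg (by positivity : (0:Int) ≤ (k : Int) + 1) hb0; omega)]
      rw [myediv _ b (r - 1) _ hlots' (by omega) (by omega),
          myemod _ b (r - 1) _ hlots' (by omega) (by omega)]
      have h1 : r.toNat = (r - 1).toNat + 1 := by omega
      have h2 : ((k : Int) + 1 + 1 - r).toNat = (((k : Int) + 1) - (r - 1)).toNat := by omega
      rw [h1, h2, List.replicate_succ, List.cons_append]

-- ===== VERDICT =====
theorem split_volume_py_spec : Claim_equal_split_volume_py := by
  intro total n _
  unfold Spec_split_volume_py split_volume_py split_volume_py_alt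
  set total' := (PySem.Int.floordiv total 100) * 100 with htot
  by_cases hlt : total' < 100
  · simp [hlt]
  · simp only [if_neg hlt]
    set lots := PySem.Int.floordiv total' 100 with hlots
    have hlots1 : 1 ≤ lots := by
      rw [hlots, PySem.Int.floordiv_eq_ediv_of_pos (by norm_num : (0:Int) < 100)]
      omega
    have hmax : max 1 lots = lots := max_eq_right hlots1
    rw [hmax]
    set n2 := min (max 1 n) lots with hn2
    have hn2pos : 0 < n2 := by
      rw [hn2]; exact lt_min (by omega) (by omega)
    have hn2le : n2 ≤ lots := min_le_right _ _
    set base := PySem.Int.floordiv lots n2 with hbase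
    set rem := PySem.Int.mod lots n2 with hrem
    have hbase1 : 1 ≤ base := by
      rw [hbase, PySem.Int.floordiv_eq_ediv_of_pos hn2pos]
      exact (Int.le_ediv_iff_mul_le hn2pos).2 (by omega)
    have hrb : 0 ≤ rem ∧ rem < n2 := by
      rw [hrem, PySem.Int.mod_eq_emod_of_pos hn2pos]
      exact ⟨Int.emod_nonneg _ (by omega), Int.emod_lt_of_pos _ hn2pos⟩
    -- A side: the q ≥ 100 test is always true, so the loop appends every element
    rw [PySem.List.foldl_congr_mem _ _
        (fun out i => out ++ (fun j => [(base + (if j < rem then (1:Int) else 0)) * 100]) i) _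
        (by intro acc i _
            have hq : (base + (if i < rem then (1:Int) else 0)) * 100 ≥ 100 := by
              split_ifs <;> nlinarith
            simp only [if_pos hq]),
      PySem.List.foldl_append_eq_flatMap (fun j => [(base + (if j < rem then (1:Int) else 0)) * 100])]
    rw [← List.map_eq_flatMap]
    rw [map_split_replicate base rem n2 hrb.1 (le_of_lt hrb.2)]
    -- B side: the peel loop in closed form
    obtain ⟨k, hk⟩ : ∃ k : Nat, n2.toNat = k + 1 := ⟨n2.toNat - 1, by omega⟩
    have hkc : (k : Int) + 1 = n2 := by omega
    rw [hk, pvPeel_closed k lots (by omega), hkc]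
    rw [hbase, hrem, PySem.Int.floordiv_eq_ediv_of_pos hn2pos, PySem.Int.mod_eq_emod_of_pos hn2pos]
    simp
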